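-- pv_equiv track=rewrite | github.com/maxtacu/code-compet | code-jam/2020/qualification/Vestigium/main.py | repeated_in_columns
-- ===== SOURCE A (Python) =====
-- def repeated_in_columns(matrix):
--     columns_with_repeated_values = 0
--     for row in range(len(matrix)):
--         new_list = []
--         for column in range(len(matrix)):
--             new_list.append(matrix[column][row])
--         if len(new_list) != len(set(new_list)):
--             columns_with_repeated_values += 1
--     return columns_with_repeated_values
-- ===== SOURCE B (Python) =====
-- def repeated_in_columns(matrix):
--     count = 0
--     for i in range(len(matrix)):
--         col = sorted(row[i] for row in matrix)
--         if any(a == b for a, b in zip(col, col[1:])):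
--             count += 1
--     return count
-- ===== Notes on version B (the rewrite author's own statement) =====
-- stated objective: alternative
-- what changed: Replaces the hash-set size comparison with a sort of each column followed by a scan of adjacent pairs to detect a repeated value, building each column directly from the rows instead of an inner index loop.
import Mathlib
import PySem

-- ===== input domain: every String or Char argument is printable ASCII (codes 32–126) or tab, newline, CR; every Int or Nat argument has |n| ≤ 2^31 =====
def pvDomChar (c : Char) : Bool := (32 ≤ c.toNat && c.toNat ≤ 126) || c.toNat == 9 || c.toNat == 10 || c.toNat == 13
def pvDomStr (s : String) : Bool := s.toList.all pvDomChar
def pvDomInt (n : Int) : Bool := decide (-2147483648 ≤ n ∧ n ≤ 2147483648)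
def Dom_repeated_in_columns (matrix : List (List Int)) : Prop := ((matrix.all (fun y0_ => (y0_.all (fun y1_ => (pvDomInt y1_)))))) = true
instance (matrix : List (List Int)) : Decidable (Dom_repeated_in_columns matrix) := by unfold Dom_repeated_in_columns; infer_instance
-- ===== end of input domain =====

-- B replaces A's hash-set size test by sorting each column and scanning adjacent pairs for a
-- repeat, building the column directly from the rows (alternative decomposition; same cost class).

-- ===== PORT A =====
def repeated_in_columns (matrix : List (List Int)) : Int :=
  (PySem.List.pyRange 0 matrix.length 1).foldl
    (fun columns_with_repeated_values row =>
      let new_list :=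
        (PySem.List.pyRange 0 matrix.length 1).foldl
          (fun acc column =>
            acc ++ [PySem.List.pyGetD (PySem.List.pyGetD matrix column []) row 0])
          []
      if (new_list.length : Int) ≠ (PySem.Set.ofList new_list).length then
        columns_with_repeated_values + 1
      else
        columns_with_repeated_values)
    0

-- ===== PORT B =====
def repeated_in_columns_alt (matrix : List (List Int)) : Int :=
  (PySem.List.pyRange 0 matrix.length 1).foldl
    (fun count i =>
      let col := PySem.List.sorted (matrix.map (fun row => PySem.List.pyGetD row i 0)) (fun x => x) false
      if (col.zip (PySem.List.slice col (some 1) none)).any (fun p => decide (p.1 = p.2)) then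
        count + 1
      else
        count)
    0

-- ===== PRECONDITION & SPEC =====
-- Pre_: each row must have at least len(matrix) entries, else Python A (and B) raise IndexError.
def Pre_repeated_in_columns (matrix : List (List Int)) : Prop :=
  ∀ row ∈ matrix, matrix.length ≤ row.length
instance (matrix : List (List Int)) : Decidable (Pre_repeated_in_columns matrix) := by
  unfold Pre_repeated_in_columns; infer_instance
def pvWitness_repeated_in_columns : List (List Int) := [[1, 2], [2, 2]]
def Spec_repeated_in_columns (matrix : List (List Int)) (out : Int) : Prop := out = repeated_in_columns_alt matrix
instance (matrix : List (List Int)) (out : Int) : Decidable (Spec_repeated_in_columns matrix out) := by unfold Spec_repeated_in_columns; infer_instance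

-- ===== CLAIM (what is proved, stated in full; the proofs are below) =====
def Claim_equal_repeated_in_columns : Prop := ∀ (matrix : List (List Int)), Dom_repeated_in_columns matrix → Pre_repeated_in_columns matrix → Spec_repeated_in_columns matrix (repeated_in_columns matrix)

-- ===== LEMMAS AND PROOFS =====

-- PySem's set(l) has the same length as l exactly when l has no duplicates.
theorem ofList_length_eq_iff (l : List Int) :
    ((PySem.Set.ofList l).length : Int) = l.length ↔ l.Nodup := by
  constructor
  · intro h
    have hperm : (PySem.Set.ofList l).Perm l.dedup := by
      refine (List.perm_ext_iff_of_nodup (PySem.Set.nodup_ofList l) l.nodup_dedup).2 ?_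
      intro x
      simp [PySem.Set.mem_ofList, List.mem_dedup]
    have hlen : l.dedup.length = l.length := by
      have := hperm.length_eq
      omega
    have : l.dedup = l := l.dedup_sublist.eq_of_length hlen
    exact List.dedup_eq_self.1 this
  · intro h
    rw [PySem.Set.ofList_eq_self_of_nodup l h]

-- the adjacent-equal scan on a ≤-sorted list detects exactly the presence of a duplicate
theorem adj_dup_iff (l : List Int) (h : l.Pairwise (· ≤ ·)) :
    ((l.zip l.tail).any (fun p => decide (p.1 = p.2)) = true) ↔ ¬ l.Nodup := by
  induction l with
  | nil => simp
  | cons a t ih =>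
    cases t with
    | nil => simp
    | cons b u =>
      by_cases hab : a = b
      · subst hab
        simp [List.any_cons]
      · have hle := h
        rw [List.pairwise_cons] at hle
        have hab' : a < b := lt_of_le_of_ne (hle.1 b (by simp)) hab
        have hnotmem : a ∉ b :: u := by
          intro hm
          rcases List.mem_cons.1 hm with h1 | h2
          · exact hab h1
          · have hbu : ∀ x ∈ u, b ≤ x := by
              have := hle.2
              rw [List.pairwise_cons] at this
              exact this.1
            exact absurd rfl (ne_of_lt (lt_of_lt_of_le hab' (hbu a h2)))
        have ihh := ih hle.2
        simp only [List.tail_cons, List.zip_cons_cons, List.any_cons] at *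
        constructor
        · intro hh
          rcases Bool.or_eq_true_iff.1 hh with h1 | h2
          · exact absurd (of_decide_eq_true h1) hab
          · intro hn
            exact (ihh.1 h2) (List.nodup_cons.1 hn).2
        · intro hn
          have : ¬ (b :: u).Nodup := by
            intro hnd
            exact hn (List.nodup_cons.2 ⟨hnotmem, hnd⟩)
          exact Bool.or_eq_true_iff.2 (Or.inr (ihh.2 this))

-- per column: A's length/set test and B's sort-and-adjacent-scan test agree
theorem cond_eq (l : List Int) :
    (if (l.length : Int) ≠ (PySem.Set.ofList l).length then true else false)
      = ((PySem.List.sorted l (fun x => x) false).zip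
          (PySem.List.slice (PySem.List.sorted l (fun x => x) false) (some 1) none)).any
          (fun p => decide (p.1 = p.2)) := by
  rw [PySem.List.slice_from_one]
  have hp : (PySem.List.sorted l (fun x => x) false).Pairwise (· ≤ ·) := by
    simpa using PySem.List.sorted_pairwise l (fun x => x)
  have hnd : (PySem.List.sorted l (fun x => x) false).Nodup ↔ l.Nodup :=
    (PySem.List.sorted_perm l (fun x => x) false).nodup_iff
  by_cases h : l.Nodup
  · have h1 : ((PySem.Set.ofList l).length : Int) = l.length := (ofList_length_eq_iff l).2 h
    have h2 : ¬ ((PySem.List.sorted l (fun x => x) false).zip (PySem.List.sorted l (fun x => x) false).tail).any (fun p => decide (p.1 = p.2)) = true := by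
      rw [adj_dup_iff _ hp]
      simp [hnd.2 h]
    simp [h1.symm, h2]
  · have h1 : ((PySem.Set.ofList l).length : Int) ≠ l.length := fun hc => h ((ofList_length_eq_iff l).1 hc)
    have h2 : ((PySem.List.sorted l (fun x => x) false).zip (PySem.List.sorted l (fun x => x) false).tail).any (fun p => decide (p.1 = p.2)) = true := by
      rw [adj_dup_iff _ hp]
      exact fun hc => h (hnd.1 hc)
    rw [h2]
    simp [Ne.symm h1]

-- the two ports agree on every input
theorem ports_eq (matrix : List (List Int)) :
    repeated_in_columns matrix = repeated_in_columns_alt matrix := by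
  unfold repeated_in_columns repeated_in_columns_alt
  congr 1
  funext cnt i
  have hcol : (PySem.List.pyRange 0 matrix.length 1).foldl
      (fun acc column => acc ++ [PySem.List.pyGetD (PySem.List.pyGetD matrix column []) i 0]) []
      = matrix.map (fun row => PySem.List.pyGetD row i 0) := by
    rw [PySem.List.foldl_pyRange_zero_pyGetD' matrix [] (fun acc row => acc ++ [PySem.List.pyGetD row i 0]) []]
    simpa using PySem.List.foldl_append_singleton_eq_map (fun row : List Int => PySem.List.pyGetD row i 0) matrix []
  simp only [hcol]
  have hc := cond_eq (matrix.map (fun row => PySem.List.pyGetD row i 0))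
  by_cases h1 : ((matrix.map (fun row => PySem.List.pyGetD row i 0)).length : Int)
      ≠ ((PySem.Set.ofList (matrix.map (fun row => PySem.List.pyGetD row i 0))).length : Int)
  · rw [if_pos h1] at hc ⊢
    rw [← hc]; simp
  · rw [if_neg h1] at hc ⊢
    rw [← hc]; simp

-- ===== VERDICT (by name: the statement is the Claim_ definition above) =====
theorem repeated_in_columns_spec : Claim_equal_repeated_in_columns := by
  intro matrix _ _
  unfold Spec_repeated_in_columns
  exact ports_eq matrix
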